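-- pv_equiv track=rewrite | github.com/dombrovskij/AdventofCode | Day4/Day4.py | get_double
-- ===== SOURCE A (Python) =====
-- def get_double(number, find_n=None):
--
--     '''
--     Input:
--         number: integer
--         find_n: find integer with any digit repeating find_n times
--
--     Output:
--         boolean
--         if no find_n specified, return True if input number contains any repeating digit
--         if find_n specified, return True if input number contains any digit repeating find_n times
--         else return False
--     '''
--
--     number = str(number)
--     prev_num = number[0]
--
--     double_label = False #Contains repeating digit
--
--     counter_list = [] #Contains al counts of digits
--     counter = 1 #Counts number of repetitions of current digit
--
--     for n in number[1:]:
--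
--         if n == prev_num:
--             double_label = True #Input number contains repeating digit
--             counter+= 1
--
--         else:
--             counter_list.append(counter) #Remember the count of this digit
--             counter = 1 #Set counter back to 1
--
--         prev_num = n
--
--     counter_list.append(counter) #Append last counter to list
--
--     if find_n: #If find_n is specified, check if input number contained a digit repeating exactly find_n times
--         if find_n in counter_list: return True
--         else: return False
--     else: #Else just return whether or not input number contained a digit repeating at least two times
--         return double_label
-- ===== SOURCE B (Python) =====
-- def get_double(number, find_n=None):
--     s = str(number)
--     breaks = [i for i, (a, b) in enumerate(zip(s, s[1:])) if a != b]
--     if find_n: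
--         edges = [-1] + breaks + [len(s) - 1]
--         return any(b - a == find_n for a, b in zip(edges, edges[1:]))
--     return len(breaks) < len(s) - 1
-- ===== Notes on version B (the rewrite author's own statement) =====
-- stated objective: alternative
-- what changed: Instead of A's stateful counter scan that accumulates a run-length list, B computes the list of break positions (indices where adjacent characters differ) and answers by arithmetic on positions: pairwise differences of the edge list [-1]+breaks+[len(s)-1] for the find_n membership, and the count comparison len(breaks) < len(s)-1 for the any-repeat case; A's 'if find_n:' truthiness (0/None) is preserved.
import Mathlib
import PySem

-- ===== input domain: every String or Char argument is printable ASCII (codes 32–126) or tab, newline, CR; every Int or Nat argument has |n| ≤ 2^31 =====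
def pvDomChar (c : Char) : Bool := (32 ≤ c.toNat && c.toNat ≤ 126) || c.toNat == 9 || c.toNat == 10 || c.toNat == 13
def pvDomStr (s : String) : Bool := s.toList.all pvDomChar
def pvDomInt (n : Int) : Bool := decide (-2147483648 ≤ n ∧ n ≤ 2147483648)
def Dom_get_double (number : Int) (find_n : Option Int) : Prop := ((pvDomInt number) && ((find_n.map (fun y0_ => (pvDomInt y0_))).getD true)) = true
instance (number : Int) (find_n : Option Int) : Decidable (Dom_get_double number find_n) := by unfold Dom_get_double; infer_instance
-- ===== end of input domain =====

-- B never builds run counts: it lists the break positions between adjacent unequal characters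
-- and answers by arithmetic on those positions (pairwise differences of the edge list, or a
-- count comparison), preserving A's 'if find_n:' truthiness (objective: alternative).

-- ===== PORT A =====
-- A's for-loop over number[1:] with state (prev_num, double_label, counter_list, counter).
def get_double_loopA (prev : Char) (dbl : Bool) (acc : List Int) (counter : Int) :
    List Char → Bool × List Int
  | [] => (dbl, acc ++ [counter])          -- loop ended; counter_list.append(counter)
  | n :: rest =>
      if n == prev then get_double_loopA n true acc (counter + 1) rest
      else get_double_loopA n dbl (acc ++ [counter]) 1 rest

def get_double (number : Int) (find_n : Option Int) : Bool :=
  match (PySem.Int.toStr number).toList with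
  | [] => false        -- unreachable: str(number) is never empty
  | prev :: rest =>
      let r := get_double_loopA prev false [] 1 rest
      match find_n with
      | some k => if k ≠ 0 then decide (k ∈ r.2) else r.1   -- 'if find_n:' truthiness
      | none => r.1

-- ===== PORT B =====
-- Source B: breaks = [i for i, (a, b) in enumerate(zip(s, s[1:])) if a != b];
-- then either pairwise differences of edges = [-1] + breaks + [len(s)-1] compared to find_n,
-- or len(breaks) < len(s) - 1.
def get_double_alt (number : Int) (find_n : Option Int) : Bool :=
  let cs := (PySem.Int.toStr number).toList
  let breaks := (PySem.List.enumerate (cs.zip cs.tail) 0).filterMap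
      (fun p => if p.2.1 ≠ p.2.2 then some p.1 else none)
  match find_n with
  | some k =>
      if k ≠ 0 then
        let edges := (-1 : Int) :: (breaks ++ [(cs.length : Int) - 1])
        (edges.zip edges.tail).any (fun q => decide (q.2 - q.1 = k))
      else decide ((breaks.length : Int) < (cs.length : Int) - 1)
  | none => decide ((breaks.length : Int) < (cs.length : Int) - 1)

-- ===== PRECONDITION & SPEC =====
def Spec_get_double (number : Int) (find_n : Option Int) (out : Bool) : Prop := out = get_double_alt number find_n
instance (number : Int) (find_n : Option Int) (out : Bool) : Decidable (Spec_get_double number find_n out) := by unfold Spec_get_double; infer_instance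

-- ===== CLAIM =====
def Claim_equal_get_double : Prop := ∀ (number : Int) (find_n : Option Int), Dom_get_double number find_n → Spec_get_double number find_n (get_double number find_n)

-- ===== LEMMAS AND PROOFS =====

/-- Adjacent-equal-pair test: what A's double_label records. -/
def hasAdj : List Char → Bool
  | a :: b :: r => a == b || hasAdj (b :: r)
  | _ => false

/-- (length of the run of `c` at the front of `c :: l`, lengths of the later runs). -/
def runsP (c : Char) : List Char → Int × List Int
  | [] => (1, [])
  | d :: r =>
      let p := runsP d r
      if d == c then (p.1 + 1, p.2) else (1, p.1 :: p.2)

theorem loopA_eq (l : List Char) : ∀ (prev : Char) (dbl : Bool) (acc : List Int) (counter : Int),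
    get_double_loopA prev dbl acc counter l =
      (dbl || hasAdj (prev :: l),
       acc ++ (counter - 1 + (runsP prev l).1) :: (runsP prev l).2) := by
  induction l with
  | nil => intro prev dbl acc counter; simp [get_double_loopA, hasAdj, runsP]
  | cons n rest ih =>
      intro prev dbl acc counter
      by_cases h : n = prev
      · subst h
        simp [get_double_loopA, ih, hasAdj, runsP]
      · have hb : (n == prev) = false := by simp [h]
        have hb2 : (prev == n) = false := by simp; exact fun e => h e.symm
        simp [get_double_loopA, hb, hb2, ih, hasAdj, runsP]

/-- Break positions (indices i with l[i] ≠ l[i+1]) starting at offset i. -/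
def breaksAux (i : Int) : List Char → List Int
  | a :: b :: r => if a == b then breaksAux (i + 1) (b :: r) else i :: breaksAux (i + 1) (b :: r)
  | _ => []

theorem enum_filter_eq (cs : List Char) : ∀ (i : Int),
    (PySem.List.enumerate (cs.zip cs.tail) i).filterMap
      (fun p => if p.2.1 ≠ p.2.2 then some p.1 else none) = breaksAux i cs := by
  induction cs with
  | nil => intro i; simp [breaksAux, PySem.List.enumerate_nil]
  | cons a cs ih =>
      intro i
      cases cs with
      | nil => simp [breaksAux, PySem.List.enumerate_nil]
      | cons b r =>
          by_cases h : a = b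
          · subst h
            simp only [List.tail_cons, List.zip_cons_cons, PySem.List.enumerate_cons,
              List.filterMap_cons]
            simpa [breaksAux] using ih (i + 1)
          · simp only [List.tail_cons, List.zip_cons_cons, PySem.List.enumerate_cons,
              List.filterMap_cons]
            have hb : (a == b) = false := by simp [h]
            simpa [breaksAux, h, hb] using congrArg (List.cons i) (ih (i + 1))

/-- Pairwise differences of consecutive elements. -/
def diffs : List Int → List Int
  | x :: y :: r => (y - x) :: diffs (y :: r)
  | _ => []

theorem zip_any_eq_mem_diffs (es : List Int) (k : Int) :
    (es.zip es.tail).any (fun q => decide (q.2 - q.1 = k)) = decide (k ∈ diffs es) := by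
  induction es with
  | nil => simp [diffs]
  | cons x es ih =>
      cases es with
      | nil => simp [diffs]
      | cons y r =>
          simp only [List.tail_cons] at ih
          simp only [List.tail_cons, List.zip_cons_cons, List.any_cons, diffs, List.mem_cons]
          rw [ih]
          by_cases h : y - x = k
          · simp [h]
          · have h2 : ¬ k = y - x := fun e => h e.symm
            simp [h, h2]

theorem diffs_edges_eq_runs (l : List Char) : ∀ (c : Char) (i : Int),
    diffs ((i - 1) :: (breaksAux i (c :: l) ++ [i + (l.length : Int)])) =
      (runsP c l).1 :: (runsP c l).2 := by
  induction l with
  | nil => intro c i; simp [breaksAux, diffs, runsP]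
  | cons d r ih =>
      intro c i
      by_cases h : d = c
      · subst h
        have hIH := ih d (i + 1)
        simp only [breaksAux, beq_self_eq_true, if_true]
        have harith : i + 1 + (r.length : Int) = i + ((d :: r).length : Int) := by
          simp; ring
        rw [harith] at hIH
        have harith2 : i + 1 - 1 = i := by ring
        rw [harith2] at hIH
        -- the tail list is nonempty (ends with the final edge)
        cases ht : breaksAux (i + 1) (d :: r) ++ [i + ((d :: r).length : Int)] with
        | nil => exact absurd ht (by simp)
        | cons y t =>
            rw [ht] at hIH
            simp only [diffs] at hIH ⊢
            rw [List.cons.injEq] at hIH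
            obtain ⟨h1, h2⟩ := hIH
            simp [runsP, h2]
            omega
      · have hb : (d == c) = false := by simp [h]
        have hb2 : (c == d) = false := by simp; exact fun e => h e.symm
        simp only [breaksAux, hb2, Bool.false_eq_true, if_false]
        have hIH := ih d (i + 1)
        have harith : i + 1 + (r.length : Int) = i + ((d :: r).length : Int) := by
          simp; ring
        rw [harith] at hIH
        have hstep : diffs ((i - 1) :: i :: (breaksAux (i + 1) (d :: r) ++ [i + ((d :: r).length : Int)]))
            = (i - (i - 1)) :: diffs (i :: (breaksAux (i + 1) (d :: r) ++ [i + ((d :: r).length : Int)])) := by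
          simp [diffs]
        simp only [List.cons_append]
        rw [hstep]
        have h3 : i + 1 - 1 = i := by ring
        rw [h3] at hIH
        rw [hIH]
        simp [runsP, hb]

theorem breaks_count (l : List Char) : ∀ (c : Char) (i : Int),
    (breaksAux i (c :: l)).length ≤ l.length ∧
      (((breaksAux i (c :: l)).length < l.length) ↔ hasAdj (c :: l) = true) := by
  induction l with
  | nil => intro c i; simp [breaksAux, hasAdj]
  | cons d r ih =>
      intro c i
      by_cases h : d = c
      · subst h
        obtain ⟨h1, _⟩ := ih d (i + 1)
        simp only [breaksAux, beq_self_eq_true, if_true, hasAdj, List.length_cons]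
        constructor
        · omega
        · simp; omega
      · have hb : (d == c) = false := by simp [h]
        have hb2 : (c == d) = false := by simp; exact fun e => h e.symm
        obtain ⟨h1, h2⟩ := ih d (i + 1)
        simp only [breaksAux, hb2, Bool.false_eq_true, if_false, hasAdj, Bool.false_or,
          List.length_cons]
        constructor
        · omega
        · rw [← h2]; omega

-- ===== VERDICT =====
theorem get_double_spec : Claim_equal_get_double := by
  intro number find_n _
  unfold Spec_get_double get_double get_double_alt
  cases hs : (PySem.Int.toStr number).toList with
  | nil =>
      cases find_n with
      | none => simp [PySem.List.enumerate_nil]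
      | some k =>
          by_cases hk : k = 0
          · simp [hk, PySem.List.enumerate_nil]
          · simp [hk, PySem.List.enumerate_nil]
            omega
  | cons c rest =>
      dsimp only
      rw [loopA_eq, enum_filter_eq]
      have hcount := breaks_count rest c 0
      cases find_n with
      | none =>
          simp only [Bool.false_or]
          rcases hcount with ⟨hle, h2⟩
          by_cases hA : hasAdj (c :: rest) = true
          · rw [hA]; symm; rw [decide_eq_true_iff]
            have hlt := h2.mpr hA
            simp only [List.length_cons]; push_cast; omega
          · rw [Bool.not_eq_true] at hA; rw [hA]; symm; rw [decide_eq_false_iff_not]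
            have hlt : ¬ (breaksAux 0 (c :: rest)).length < rest.length :=
              fun hl => by simp [h2.mp hl] at hA
            simp only [List.length_cons]; push_cast; omega
      | some k =>
          by_cases hk : k = 0
          · simp only [hk, ne_eq, not_true_eq_false, if_false, Bool.false_or]
            rcases hcount with ⟨hle, h2⟩
            by_cases hA : hasAdj (c :: rest) = true
            · rw [hA]; symm; rw [decide_eq_true_iff]
              have hlt := h2.mpr hA
              simp only [List.length_cons]; push_cast; omega
            · rw [Bool.not_eq_true] at hA; rw [hA]; symm; rw [decide_eq_false_iff_not]
              have hlt : ¬ (breaksAux 0 (c :: rest)).length < rest.length :=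
                fun hl => by simp [h2.mp hl] at hA
              simp only [List.length_cons]; push_cast; omega
          · simp only [ne_eq, hk, not_false_eq_true, if_true, List.nil_append]
            rw [zip_any_eq_mem_diffs]
            have hedge : ((-1 : Int) :: (breaksAux 0 (c :: rest) ++ [((c :: rest).length : Int) - 1]))
                = ((0 : Int) - 1) :: (breaksAux 0 (c :: rest) ++ [(0 : Int) + (rest.length : Int)]) := by
              simp only [List.length_cons]; push_cast; norm_num
            rw [hedge, diffs_edges_eq_runs]
            norm_num
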